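-- pv_equiv track=rewrite | github.com/pypi-data/pypi-mirror-56 | packages/fitmulticell/fitmulticell-0.0.3-py3-none-any.whl/fitmulticell/sumstat/hexagonal_cluster_sumstat.py | find_offset_list
-- ===== SOURCE A (Python) =====
-- def find_offset_list(edge: int) -> list:
--     """
--     Get the offset for all rows to be used to identify the neighbor cells.
--
--     Parameters
--     ----------
--     edge: int
--         The edge size of the hexagonal grid.
--
--     Returns
--     -------
--     offset: list
--         A list of offsets for the entire hexagonal grids.
--     """
--     k = 0
--     counter_index = 0
--     offset = []
--     for i in range(0, edge * 2 - 2):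
--         if i < edge - 1:
--             k = edge + i
--             offset.append(k)
--         else:
--             offset.append(k - counter_index)
--             counter_index = counter_index + 1
--     return offset
-- ===== SOURCE B (Python) =====
-- def find_offset_list(edge: int) -> list:
--     """Offsets for all rows of a hexagonal grid: an ascending then a
--     descending arithmetic run, built as two ranges (no loop state)."""
--     return list(range(edge, 2 * edge - 1)) + list(range(2 * edge - 2, edge - 1, -1))
-- ===== Notes on version B (the rewrite author's own statement) =====
-- stated objective: simpler
-- what changed: Replaces the single loop with branch and two running state variables (k, counter_index) by the concatenation of two closed-form ranges: an ascending run from edge to 2*edge-2 followed by a descending run back down to edge.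
import Mathlib
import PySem

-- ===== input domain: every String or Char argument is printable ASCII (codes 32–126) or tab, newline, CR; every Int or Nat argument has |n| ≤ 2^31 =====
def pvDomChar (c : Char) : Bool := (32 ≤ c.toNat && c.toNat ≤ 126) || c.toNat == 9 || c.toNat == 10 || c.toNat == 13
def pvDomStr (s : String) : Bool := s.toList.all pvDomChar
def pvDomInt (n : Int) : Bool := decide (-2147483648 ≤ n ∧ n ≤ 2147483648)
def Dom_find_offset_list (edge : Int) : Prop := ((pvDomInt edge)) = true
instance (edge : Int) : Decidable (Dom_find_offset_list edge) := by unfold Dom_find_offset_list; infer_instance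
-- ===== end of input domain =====

-- B replaces A's stateful loop (branch + two running variables) by two closed-form ranges: simpler, same cost.

-- ===== PORT A =====
-- the loop body of A: state = (k, counter_index, offset)
def folStep (edge : Int) (st : Int × Int × List Int) (i : Int) : Int × Int × List Int :=
  if i < edge - 1 then (edge + i, st.2.1, st.2.2 ++ [edge + i])
  else (st.1, st.2.1 + 1, st.2.2 ++ [st.1 - st.2.1])

def find_offset_list (edge : Int) : List Int :=
  ((PySem.List.pyRange 0 (edge * 2 - 2) 1).foldl (folStep edge) (0, 0, [])).2.2

-- ===== PORT B =====
def find_offset_list_alt (edge : Int) : List Int :=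
  PySem.List.pyRange edge (2 * edge - 1) 1 ++ PySem.List.pyRange (2 * edge - 2) (edge - 1) (-1)

-- ===== PRECONDITION & SPEC =====
def Spec_find_offset_list (edge : Int) (out : List Int) : Prop := out = find_offset_list_alt edge
instance (edge : Int) (out : List Int) : Decidable (Spec_find_offset_list edge out) := by unfold Spec_find_offset_list; infer_instance

-- ===== CLAIM (what is proved, stated in full; the proofs are below) =====
def Claim_equal_find_offset_list : Prop := ∀ (edge : Int), Dom_find_offset_list edge → Spec_find_offset_list edge (find_offset_list edge)

-- ===== LEMMAS AND PROOFS =====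

-- ascending phase: every i in pyRange a (e-1) 1 takes the then-branch; final state
theorem fol_asc (e : Int) : ∀ (n : Nat) (a : Int), (e - 1 - a).toNat = n → 0 ≤ a → a < e - 1 →
    ∀ (k0 : Int) (off : List Int),
      (PySem.List.pyRange a (e - 1) 1).foldl (folStep e) (k0, 0, off)
        = (2 * e - 2, 0, off ++ (PySem.List.pyRange a (e - 1) 1).map (fun i => e + i)) := by
  intro n
  induction n with
  | zero => intro a h _ hlt; omega
  | succ n ih =>
    intro a h ha hlt k0 off
    rw [PySem.List.pyRange_one_cons hlt]
    simp only [List.foldl_cons, List.map_cons, folStep, if_pos hlt]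
    by_cases h2 : a + 1 < e - 1
    · rw [ih (a + 1) (by omega) (by omega) h2]
      simp
    · have he : a = e - 2 := by omega
      rw [PySem.List.pyRange_one_eq_nil (by omega)]
      simp [List.foldl_nil]
      omega

-- descending phase: every i takes the else-branch; only the offset list matters
theorem fol_desc (e : Int) : ∀ (l : List Int), (∀ i ∈ l, ¬ i < e - 1) →
    ∀ (k c0 : Int) (off : List Int),
      (l.foldl (folStep e) (k, c0, off)).2.2
        = off ++ (List.range l.length).map (fun (j : Nat) => k - c0 - (j : Int)) := by
  intro l
  induction l with
  | nil => intro _ k c0 off; simp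
  | cons i l ih =>
    intro hall k c0 off
    simp only [List.foldl_cons, folStep, if_neg (hall i (by simp))]
    rw [ih (fun j hj => hall j (by simp [hj])) k (c0 + 1) (off ++ [k - c0])]
    rw [List.length_cons, List.range_succ_eq_map, List.map_cons, List.map_map]
    simp only [List.append_assoc, List.cons_append, List.nil_append, Function.comp_def]
    congr 2
    · omega
    · apply List.map_congr_left; intro j _; push_cast; ring

theorem find_offset_list_eq (edge : Int) : find_offset_list edge = find_offset_list_alt edge := by
  by_cases he : edge ≤ 1
  · unfold find_offset_list find_offset_list_alt
    rw [PySem.List.pyRange_one_eq_nil (by omega),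
        PySem.List.pyRange_one_eq_nil (by omega),
        PySem.List.pyRange_neg_one_eq_nil (by omega)]
    simp
  · have h2 : 2 ≤ edge := by omega
    unfold find_offset_list find_offset_list_alt
    rw [PySem.List.pyRange_one_append 0 (edge - 1) (edge * 2 - 2) (by omega) (by omega),
        List.foldl_append]
    rw [fol_asc edge (edge - 1).toNat 0 (by omega) (by omega) (by omega)]
    rw [fol_desc edge _ (fun i hi => by
          rw [PySem.List.mem_pyRange_one] at hi; omega)]
    rw [PySem.List.length_pyRange_one, PySem.List.pyRange_neg_one,
        PySem.List.pyRange_one, PySem.List.pyRange_one]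
    have hn : (edge * 2 - 2 - (edge - 1)).toNat = (edge - 1).toNat := by omega
    have hn2 : (2 * edge - 1 - edge).toNat = (edge - 1).toNat := by omega
    have hn3 : (2 * edge - 2 - (edge - 1)).toNat = (edge - 1).toNat := by omega
    rw [hn, hn2, hn3]
    simp only [List.map_map, Function.comp_def, List.nil_append]
    have e0 : (edge - 1 - 0).toNat = (edge - 1).toNat := by omega
    rw [e0]
    congr 1
    · apply List.map_congr_left; intro k _; omega
    · apply List.map_congr_left; intro k _; omega

-- ===== VERDICT (by name: the statement is the Claim_ definition above) =====
theorem find_offset_list_spec : Claim_equal_find_offset_list := by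
  intro edge _
  unfold Spec_find_offset_list
  exact find_offset_list_eq edge
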